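-- pv_equiv track=rewrite | github.com/clementnader/cbtc_configuration_checking | _prj/src/control_tables/route_overlap_verification/route.py | _correspondence_route_control_table_dc_sys
-- ===== SOURCE A (Python) =====
-- def _correspondence_route_control_table_dc_sys(route_control_table, route_dc_sys, remove_zero: bool = False):
--     if remove_zero:
--         # try removing leading 0 in sig names
--         route_dc_sys = "_".join([sig.removeprefix("0") for sig in route_dc_sys.split("_")])
--         route_control_table = "-".join([sig.removeprefix("0") for sig in route_control_table.split("-")])
--
--     route_dc_sys = "_".join([sig.upper() for sig in route_dc_sys.split("_")])
--     route_control_table = "_".join([sig.upper() for sig in route_control_table.split("-")]).replace(" ", "")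
--     if route_dc_sys.endswith(route_control_table):
--         return True
--     # in some projects, the route in DC_SYS is named with 'S' in front of signals name
--     test_route_control_table = "_".join(["S" + sig for sig in route_control_table.split("_")])
--     if route_dc_sys.endswith(test_route_control_table):
--         return True
--     # in some projects, the route in DC_SYS is named with 'f' or 'F' in at the end of route name
--     route_dc_sys = "_".join([sig.removesuffix("F") for sig in route_dc_sys.split("_")])
--     if route_dc_sys.endswith(route_control_table) or route_dc_sys.endswith(test_route_control_table):
--         return True
--
--     return False
-- ===== SOURCE B (Python) =====
-- def _correspondence_route_control_table_dc_sys(route_control_table, route_dc_sys, remove_zero: bool = False):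
--     # Normalize exactly as the original: optional leading-zero stripping, uppercase, '-'->'_', drop spaces.
--     if remove_zero:
--         route_dc_sys = "_".join(sig.removeprefix("0") for sig in route_dc_sys.split("_"))
--         route_control_table = "-".join(sig.removeprefix("0") for sig in route_control_table.split("-"))
--     dsegs = "_".join(sig.upper() for sig in route_dc_sys.split("_")).split("_")
--     csegs = "_".join(sig.upper() for sig in route_control_table.split("-")).replace(" ", "").split("_")
--
--     def seg_match(fd, fc):
--         # backward two-pointer walk over the segment lists; no variant strings are built
--         i, j = len(dsegs) - 1, len(csegs) - 1
--         while j > 0: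
--             if i < 0 or fd(dsegs[i]) != fc(csegs[j]):
--                 return False
--             i -= 1
--             j -= 1
--         return i >= 0 and fd(dsegs[i]).endswith(fc(csegs[0]))
--
--     ident = lambda s: s
--     drop_f = lambda s: s.removesuffix("F")
--     add_s = lambda s: "S" + s
--     return any(seg_match(fd, fc) for fd in (ident, drop_f) for fc in (ident, add_s))
-- ===== Notes on version B (the rewrite author's own statement) =====
-- stated objective: alternative
-- what changed: Instead of building the S-prefixed and F-stripped variant strings and running three sequential endswith guards, B splits both normalized names into '_'-segments once and decides each of the four transform combinations by a backward two-pointer walk over the segment lists (tail segments equal, deepest control-table segment a character suffix), applying the F/S transforms lazily per comparison; no variant string is ever constructed.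
import Mathlib
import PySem

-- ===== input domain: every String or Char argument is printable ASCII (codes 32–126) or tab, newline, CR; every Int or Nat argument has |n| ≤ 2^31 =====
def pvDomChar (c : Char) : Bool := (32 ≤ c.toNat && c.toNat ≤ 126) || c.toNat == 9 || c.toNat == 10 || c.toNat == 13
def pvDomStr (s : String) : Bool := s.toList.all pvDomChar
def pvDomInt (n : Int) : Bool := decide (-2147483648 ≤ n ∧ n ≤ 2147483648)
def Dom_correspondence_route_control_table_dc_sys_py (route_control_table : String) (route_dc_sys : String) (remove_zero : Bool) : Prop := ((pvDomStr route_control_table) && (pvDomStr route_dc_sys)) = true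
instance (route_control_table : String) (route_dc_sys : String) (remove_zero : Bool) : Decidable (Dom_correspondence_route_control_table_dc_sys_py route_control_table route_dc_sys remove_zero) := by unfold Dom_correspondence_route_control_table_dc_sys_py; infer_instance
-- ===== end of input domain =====

-- B replaces A's build-variant-strings-and-endswith strategy by splitting both normalized
-- names into '_'-segments once and doing a backward two-pointer walk over the segment lists
-- (tail segments compared for equality, the deepest control-table segment as a character
-- suffix), applying the F/S transforms lazily per comparison (objective: alternative).


-- ===== PORT A =====
-- s.removeprefix("0") (hand port, exact: drop the prefix iff it is there)
def pvRemovePrefix0 (s : List Char) : List Char :=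
  if PySem.Chars.startswith s ['0'] then s.drop 1 else s

-- s.removesuffix("F") (hand port, exact: drop the suffix iff it is there)
def pvRemoveSuffixF (s : List Char) : List Char :=
  if PySem.Chars.endswith s ['F'] then s.dropLast else s

def correspondence_route_control_table_dc_sys_py (route_control_table : String) (route_dc_sys : String) (remove_zero : Bool) : Bool :=
  let ds0 := route_dc_sys.toList
  let ct0 := route_control_table.toList
  let ds1 := if remove_zero then PySem.Chars.join ['_'] ((PySem.Chars.splitOn ds0 ['_']).map pvRemovePrefix0) else ds0
  let ct1 := if remove_zero then PySem.Chars.join ['-'] ((PySem.Chars.splitOn ct0 ['-']).map pvRemovePrefix0) else ct0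
  let ds2 := PySem.Chars.join ['_'] ((PySem.Chars.splitOn ds1 ['_']).map PySem.Chars.upper)
  let ct2 := PySem.Chars.replace (PySem.Chars.join ['_'] ((PySem.Chars.splitOn ct1 ['-']).map PySem.Chars.upper)) [' '] []
  if PySem.Chars.endswith ds2 ct2 then true
  else
    let tct := PySem.Chars.join ['_'] ((PySem.Chars.splitOn ct2 ['_']).map (fun sig => 'S' :: sig))
    if PySem.Chars.endswith ds2 tct then true
    else
      let ds3 := PySem.Chars.join ['_'] ((PySem.Chars.splitOn ds2 ['_']).map pvRemoveSuffixF)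
      if PySem.Chars.endswith ds3 ct2 || PySem.Chars.endswith ds3 tct then true
      else false

-- ===== PORT B =====
-- "S" + sig
def pvAddS (s : List Char) : List Char := 'S' :: s

-- Source B's seg_match: backward walk over the two segment lists (ported as structural
-- recursion on the reversed lists; the index pair (i, j) walking back IS this recursion);
-- the transforms fd/fc are applied lazily at each comparison, as in Source B
def pvSegMatch (fd fc : List Char → List Char) : List (List Char) → List (List Char) → Bool
  | _, [] => false
  | [], _ :: _ => false
  | d :: _, [c0] => PySem.Chars.endswith (fd d) (fc c0)
  | d :: ds, c0 :: c1 :: cs => (fd d == fc c0) && pvSegMatch fd fc ds (c1 :: cs)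

def correspondence_route_control_table_dc_sys_py_alt (route_control_table : String) (route_dc_sys : String) (remove_zero : Bool) : Bool :=
  let ds1 := if remove_zero then PySem.Chars.join ['_'] ((PySem.Chars.splitOn route_dc_sys.toList ['_']).map pvRemovePrefix0) else route_dc_sys.toList
  let ct1 := if remove_zero then PySem.Chars.join ['-'] ((PySem.Chars.splitOn route_control_table.toList ['-']).map pvRemovePrefix0) else route_control_table.toList
  let dsegs := PySem.Chars.splitOn (PySem.Chars.join ['_'] ((PySem.Chars.splitOn ds1 ['_']).map PySem.Chars.upper)) ['_']
  let csegs := PySem.Chars.splitOn (PySem.Chars.replace (PySem.Chars.join ['_'] ((PySem.Chars.splitOn ct1 ['-']).map PySem.Chars.upper)) [' '] []) ['_']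
  [((id : List Char → List Char), (id : List Char → List Char)), (id, pvAddS),
   (pvRemoveSuffixF, id), (pvRemoveSuffixF, pvAddS)].any
    (fun p => pvSegMatch p.1 p.2 dsegs.reverse csegs.reverse)

-- ===== PRECONDITION & SPEC =====
def Spec_correspondence_route_control_table_dc_sys_py (route_control_table : String) (route_dc_sys : String) (remove_zero : Bool) (out : Bool) : Prop := out = correspondence_route_control_table_dc_sys_py_alt route_control_table route_dc_sys remove_zero
instance (route_control_table : String) (route_dc_sys : String) (remove_zero : Bool) (out : Bool) : Decidable (Spec_correspondence_route_control_table_dc_sys_py route_control_table route_dc_sys remove_zero out) := by unfold Spec_correspondence_route_control_table_dc_sys_py; infer_instance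

-- ===== CLAIM (what is proved, stated in full; the proofs are below) =====
def Claim_equal_correspondence_route_control_table_dc_sys_py : Prop := ∀ (route_control_table : String) (route_dc_sys : String) (remove_zero : Bool), Dom_correspondence_route_control_table_dc_sys_py route_control_table route_dc_sys remove_zero → Spec_correspondence_route_control_table_dc_sys_py route_control_table route_dc_sys remove_zero (correspondence_route_control_table_dc_sys_py route_control_table route_dc_sys remove_zero)

-- ===== LEMMAS AND PROOFS =====
def spHead : List Char → List Char
  | [] => []
  | a :: t => if a = '_' then [] else a :: spHead t

def spTail : List Char → List (List Char)
  | [] => []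
  | a :: t => if a = '_' then spHead t :: spTail t else spTail t

theorem go_spec : ∀ (fuel : Nat) (l cur : List Char) (acc : List (List Char)),
    l.length < fuel →
    PySem.Chars.splitOn.go ['_'] fuel l cur acc
      = acc.reverse ++ (cur.reverse ++ spHead l) :: spTail l := by
  intro fuel
  induction fuel with
  | zero => intro l cur acc h; omega
  | succ f ih =>
    intro l cur acc h
    cases l with
    | nil => simp [PySem.Chars.splitOn.go, spHead, spTail]
    | cons c rest =>
      by_cases hc : c = '_'
      · subst hc
        rw [show PySem.Chars.splitOn.go ['_'] (f+1) ('_' :: rest) cur acc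
              = PySem.Chars.splitOn.go ['_'] f (List.drop 1 ('_' :: rest)) [] (cur.reverse :: acc) by
              simp [PySem.Chars.splitOn.go, List.isPrefixOf]]
        rw [ih _ _ _ (by simpa using Nat.lt_of_succ_lt_succ h)]
        simp [spHead, spTail]
      · rw [show PySem.Chars.splitOn.go ['_'] (f+1) (c :: rest) cur acc
              = PySem.Chars.splitOn.go ['_'] f rest (c :: cur) acc by
              simp [PySem.Chars.splitOn.go, List.isPrefixOf, Ne.symm hc]]
        rw [ih _ _ _ (by simpa using Nat.lt_of_succ_lt_succ h)]
        simp [spHead, spTail, hc]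

theorem splitOn_eq (l : List Char) : PySem.Chars.splitOn l ['_'] = spHead l :: spTail l := by
  rw [PySem.Chars.splitOn, go_spec _ _ _ _ (by omega)]; simp

theorem spHead_no (l : List Char) : ('_' : Char) ∉ spHead l := by
  induction l with
  | nil => simp [spHead]
  | cons a t ih =>
    by_cases h : a = '_' <;> simp [spHead, h]
    exact ⟨fun e => h e.symm, ih⟩

theorem spTail_no (l : List Char) : ∀ s ∈ spTail l, ('_' : Char) ∉ s := by
  induction l with
  | nil => simp [spTail]
  | cons a t ih =>
    by_cases h : a = '_' <;> simp [spTail, h]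
    · exact ⟨spHead_no t, ih⟩
    · exact ih

theorem join_sp (l : List Char) :
    PySem.Chars.join ['_'] (spHead l :: spTail l) = l := by
  induction l with
  | nil => simp [spHead, spTail, PySem.Chars.join, List.intercalate]
  | cons a t ih =>
    by_cases h : a = '_'
    · subst h
      rw [show spHead ('_' :: t) = [] by simp [spHead],
          show spTail ('_' :: t) = spHead t :: spTail t by simp [spTail],
          PySem.Chars.join, show List.intercalate ['_'] ([] :: spHead t :: spTail t)
            = '_' :: List.intercalate ['_'] (spHead t :: spTail t) by simp [List.intercalate],
          ← PySem.Chars.join, ih]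
    · rw [show spHead (a :: t) = a :: spHead t by simp [spHead, h],
          show spTail (a :: t) = spTail t by simp [spTail, h]]
      cases ht : spTail t with
      | nil =>
        rw [ht] at ih
        simp [PySem.Chars.join, List.intercalate] at ih ⊢
        exact ih
      | cons x xs =>
        rw [ht] at ih
        rw [PySem.Chars.join] at ih ⊢
        rw [show List.intercalate ['_'] ((a :: spHead t) :: x :: xs)
              = a :: List.intercalate ['_'] (spHead t :: x :: xs) by simp [List.intercalate], ih]

-- prefix sub-lemmas
theorem pre_drop {c : Char} {p e t : List Char} (hp : c ∉ p) :
    p <+: (e ++ c :: t) ↔ p <+: e := by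
  constructor
  · intro h
    induction p generalizing e with
    | nil => simp
    | cons a p' ih =>
      cases e with
      | nil =>
        simp at h
        simp at hp
        exact absurd h.1.symm hp.1
      | cons b e' =>
        simp at h hp ⊢
        exact ⟨h.1, ih hp.2 h.2⟩
  · intro h; exact h.trans (List.prefix_append _ _)

theorem pre_sep {c : Char} {e d V U : List Char} (he : c ∉ e) (hd : c ∉ d) :
    (e ++ c :: V) <+: (d ++ c :: U) ↔ e = d ∧ V <+: U := by
  constructor
  · intro h
    induction e generalizing d with
    | nil =>
      cases d with
      | nil => simpa using h
      | cons b d' =>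
        simp at h
        simp at hd
        exact absurd h.1 hd.1
    | cons a e' ih =>
      cases d with
      | nil =>
        simp at h
        simp at he
        exact absurd h.1.symm he.1
      | cons b d' =>
        simp at h he hd ⊢
        obtain ⟨h1, h2⟩ := h
        obtain ⟨h3, h4⟩ := ih he.2 hd.2 h2
        exact ⟨⟨h1, h3⟩, h4⟩
  · rintro ⟨rfl, h⟩
    simpa using h

theorem endswith_decide (s p : List Char) : PySem.Chars.endswith s p = decide (p <:+ s) := by
  by_cases h : p <:+ s
  · simp [(PySem.Chars.endswith_iff s p).mpr h, h]
  · simp only [decide_eq_false h]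
    by_contra hb
    exact h ((PySem.Chars.endswith_iff s p).mp (by simpa using hb))

theorem join_cons₂ (x y : List Char) (L : List (List Char)) :
    PySem.Chars.join ['_'] (x :: y :: L) = x ++ '_' :: PySem.Chars.join ['_'] (y :: L) := by
  simp [PySem.Chars.join, List.intercalate]

theorem join_singleton' (a : List Char) : PySem.Chars.join ['_'] [a] = a := by
  simp [PySem.Chars.join, List.intercalate]

theorem join_append_singleton (L : List (List Char)) (hL : L ≠ []) (a : List Char) :
    PySem.Chars.join ['_'] (L ++ [a]) = PySem.Chars.join ['_'] L ++ '_' :: a := by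
  induction L with
  | nil => exact absurd rfl hL
  | cons x L' ih =>
    cases L' with
    | nil => rw [List.cons_append, List.nil_append, join_cons₂, join_singleton', join_singleton']
    | cons y L'' =>
      rw [show (x :: y :: L'') ++ [a] = x :: ((y :: L'') ++ [a]) by simp,
          show (y :: L'') ++ [a] = y :: (L'' ++ [a]) by simp, join_cons₂,
          show y :: (L'' ++ [a]) = (y :: L'') ++ [a] by simp, ih (by simp), join_cons₂]
      simp

theorem suf_drop {c : Char} {p d W : List Char} (hp : c ∉ p) :
    p <:+ (W ++ c :: d) ↔ p <:+ d := by
  constructor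
  · intro h
    have h' : p.reverse <+: (d.reverse ++ c :: W.reverse) := by
      have := List.reverse_prefix.mpr h
      simpa using this
    exact List.reverse_prefix.mp (by simpa using (pre_drop (by simpa using hp)).mp h')
  · intro h
    exact h.trans ⟨W ++ [c], by simp⟩

theorem suf_sep {c : Char} {e d V U : List Char} (he : c ∉ e) (hd : c ∉ d) :
    (V ++ c :: e) <:+ (U ++ c :: d) ↔ e = d ∧ V <:+ U := by
  constructor
  · intro h
    have h' := List.reverse_prefix.mpr h
    rw [show (V ++ c :: e).reverse = e.reverse ++ c :: V.reverse by simp,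
        show (U ++ c :: d).reverse = d.reverse ++ c :: U.reverse by simp] at h'
    obtain ⟨h1, h2⟩ := (pre_sep (by simpa using he) (by simpa using hd)).mp h'
    exact ⟨by simpa using congrArg List.reverse h1, List.reverse_prefix.mp h2⟩
  · rintro ⟨rfl, h⟩
    obtain ⟨w, rfl⟩ := h
    exact ⟨w, by simp⟩

theorem pvSegMatch_map (fd fc : List Char → List Char) :
    ∀ (Y X : List (List Char)), pvSegMatch fd fc X Y = pvSegMatch id id (X.map fd) (Y.map fc) := by
  intro Y
  induction Y with
  | nil => intro X; cases X <;> simp [pvSegMatch]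
  | cons c0 Y' ih =>
    intro X
    cases X with
    | nil => simp [pvSegMatch]
    | cons d X' =>
      cases Y' with
      | nil => simp [pvSegMatch]
      | cons c1 Y'' => simp [pvSegMatch, ih]

theorem beq_and_decide (d c : List Char) (P : Prop) [Decidable P] :
    ((d == c) && decide P) = decide (c = d ∧ P) := by
  by_cases h : c = d
  · subst h
    simp
  · have hbeq : (d == c) = false := by
      simp only [beq_eq_false_iff_ne, ne_eq]
      exact fun hh => h hh.symm
    simp [hbeq, h]

theorem segM_main : ∀ (YR XR : List (List Char)),
    (∀ s ∈ XR, ('_' : Char) ∉ s) → (∀ s ∈ YR, ('_' : Char) ∉ s) → XR ≠ [] → YR ≠ [] →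
    pvSegMatch id id XR YR
      = PySem.Chars.endswith (PySem.Chars.join ['_'] XR.reverse)
          (PySem.Chars.join ['_'] YR.reverse) := by
  intro YR
  induction YR with
  | nil => intro XR _ _ _ h; exact absurd rfl h
  | cons c0 YR' ih =>
    intro XR hX hY hXne _
    cases XR with
    | nil => exact absurd rfl hXne
    | cons d0 XR' =>
      have hd0 : ('_' : Char) ∉ d0 := hX d0 (by simp)
      have hc0 : ('_' : Char) ∉ c0 := hY c0 (by simp)
      cases YR' with
      | nil =>
        simp only [pvSegMatch, id]
        rw [show (([c0] : List (List Char)).reverse) = [c0] by simp, join_singleton']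
        cases XR' with
        | nil =>
          rw [show (([d0] : List (List Char)).reverse) = [d0] by simp, join_singleton']
        | cons d1 XR'' =>
          rw [show ((d0 :: d1 :: XR'').reverse) = (d1 :: XR'').reverse ++ [d0] by simp,
              join_append_singleton _ (by simp) _, endswith_decide, endswith_decide,
              decide_eq_decide]
          exact (suf_drop hc0).symm
      | cons c1 YR'' =>
        rw [show ((c0 :: c1 :: YR'').reverse) = (c1 :: YR'').reverse ++ [c0] by simp,
            join_append_singleton _ (by simp) _]
        cases XR' with
        | nil =>
          rw [show (([d0] : List (List Char)).reverse) = [d0] by simp, join_singleton',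
              endswith_decide]
          have hfalse : ¬ ((PySem.Chars.join ['_'] (YR''.reverse ++ [c1]) ++ '_' :: c0) <:+ d0) := by
            intro h
            exact hd0 (h.subset (by simp))
          simp [pvSegMatch, hfalse]
        | cons d1 XR'' =>
          rw [show ((d0 :: d1 :: XR'').reverse) = (d1 :: XR'').reverse ++ [d0] by simp,
              join_append_singleton _ (by simp) _, endswith_decide, decide_eq_decide.mpr
                (suf_sep hc0 hd0)]
          have hrec := ih (d1 :: XR'') (fun s hs => hX s (by simp at hs ⊢; tauto))
            (fun s hs => hY s (by simp at hs ⊢; tauto)) (by simp) (by simp)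
          simp only [pvSegMatch, id, hrec, endswith_decide]
          exact beq_and_decide d0 c0 _

-- the three transforms preserve '_'-freeness of a segment
theorem pres_id (s : List Char) (h : ('_' : Char) ∉ s) : ('_' : Char) ∉ (id s : List Char) := h

theorem pres_addS (s : List Char) (h : ('_' : Char) ∉ s) : ('_' : Char) ∉ pvAddS s := by
  simp [pvAddS, h]

theorem pres_F (s : List Char) (h : ('_' : Char) ∉ s) : ('_' : Char) ∉ pvRemoveSuffixF s := by
  unfold pvRemoveSuffixF
  split
  · exact fun hm => h ((List.dropLast_sublist s).subset hm)
  · exact h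

theorem join_splitOn (l : List Char) :
    PySem.Chars.join ['_'] (PySem.Chars.splitOn l ['_']) = l := by
  rw [splitOn_eq]; exact join_sp l

-- the bridge used once per (fd, fc) combination
theorem combo (fd fc : List Char → List Char)
    (hfd : ∀ s : List Char, ('_' : Char) ∉ s → ('_' : Char) ∉ fd s)
    (hfc : ∀ s : List Char, ('_' : Char) ∉ s → ('_' : Char) ∉ fc s) (x y : List Char) :
    pvSegMatch fd fc (PySem.Chars.splitOn x ['_']).reverse (PySem.Chars.splitOn y ['_']).reverse
      = PySem.Chars.endswith
          (PySem.Chars.join ['_'] ((PySem.Chars.splitOn x ['_']).map fd))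
          (PySem.Chars.join ['_'] ((PySem.Chars.splitOn y ['_']).map fc)) := by
  rw [splitOn_eq, splitOn_eq, pvSegMatch_map,
      show (spHead x :: spTail x).reverse.map fd = ((spHead x :: spTail x).map fd).reverse by
        simp,
      show (spHead y :: spTail y).reverse.map fc = ((spHead y :: spTail y).map fc).reverse by
        simp,
      segM_main _ _ ?_ ?_ (by simp) (by simp), List.reverse_reverse, List.reverse_reverse]
  · intro s hs
    simp only [List.mem_reverse, List.mem_map] at hs
    obtain ⟨t, ht, rfl⟩ := hs
    rcases List.mem_cons.mp ht with rfl | ht'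
    · exact hfd _ (spHead_no x)
    · exact hfd _ (spTail_no x t ht')
  · intro s hs
    simp only [List.mem_reverse, List.mem_map] at hs
    obtain ⟨t, ht, rfl⟩ := hs
    rcases List.mem_cons.mp ht with rfl | ht'
    · exact hfc _ (spHead_no y)
    · exact hfc _ (spTail_no y t ht')

theorem pvGuardChain_eq (a b c d : Bool) :
    (if a then true else if b then true else if c || d then true else false)
      = (a || (b || (c || d))) := by
  cases a <;> cases b <;> cases c <;> cases d <;> rfl

-- A's guard chain over the normalized strings x, y equals B's any-over-combos
theorem chain_eq (x y : List Char) :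
    (if PySem.Chars.endswith x y then true
     else if PySem.Chars.endswith x
          (PySem.Chars.join ['_'] ((PySem.Chars.splitOn y ['_']).map (fun sig => 'S' :: sig))) then true
     else if PySem.Chars.endswith
            (PySem.Chars.join ['_'] ((PySem.Chars.splitOn x ['_']).map pvRemoveSuffixF)) y
          || PySem.Chars.endswith
            (PySem.Chars.join ['_'] ((PySem.Chars.splitOn x ['_']).map pvRemoveSuffixF))
            (PySem.Chars.join ['_'] ((PySem.Chars.splitOn y ['_']).map (fun sig => 'S' :: sig))) then true
     else false)
    = [((id : List Char → List Char), (id : List Char → List Char)), (id, pvAddS),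
       (pvRemoveSuffixF, id), (pvRemoveSuffixF, pvAddS)].any
        (fun p => pvSegMatch p.1 p.2 (PySem.Chars.splitOn x ['_']).reverse
          (PySem.Chars.splitOn y ['_']).reverse) := by
  simp only [List.any_cons, List.any_nil, Bool.or_false,
    combo id id pres_id pres_id x y,
    combo id pvAddS pres_id pres_addS x y,
    combo pvRemoveSuffixF id pres_F pres_id x y,
    combo pvRemoveSuffixF pvAddS pres_F pres_addS x y,
    List.map_id, join_splitOn]
  rw [pvGuardChain_eq]
  rfl

-- ===== VERDICT (by name: the statement is the Claim_ definition above) =====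
theorem correspondence_route_control_table_dc_sys_py_spec : Claim_equal_correspondence_route_control_table_dc_sys_py := by
  intro rct rds rz _
  unfold Spec_correspondence_route_control_table_dc_sys_py
  unfold correspondence_route_control_table_dc_sys_py correspondence_route_control_table_dc_sys_py_alt
  exact chain_eq _ _
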